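-- pv_equiv track=rewrite | github.com/WaitDumplings/RL_EVRPTW | problem/evrp.py | count_routes_per_row
-- ===== SOURCE A (Python) =====
-- def count_routes_per_row(row):
--     """count routes"""
--     routes = 0
--     in_route = False
--
--     for value in row:
--         if value != 0 and not in_route:
--             # start a new route
--             in_route = True
--         elif value == 0 and in_route:
--             # complete a route
--             routes += 1
--             in_route = False
--
--     return routes
-- ===== SOURCE B (Python) =====
-- from itertools import pairwise
--
--
-- def count_routes_per_row(row):
--     """count routes"""
--     return sum(1 for a, b in pairwise(row) if a != 0 and b == 0)
-- ===== Notes on version B (the rewrite author's own statement) =====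
-- stated objective: simpler
-- what changed: Replaces the in_route state machine with a direct count of nonzero->zero adjacent pairs via itertools.pairwise, eliminating the maintained flag.
import Mathlib
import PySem

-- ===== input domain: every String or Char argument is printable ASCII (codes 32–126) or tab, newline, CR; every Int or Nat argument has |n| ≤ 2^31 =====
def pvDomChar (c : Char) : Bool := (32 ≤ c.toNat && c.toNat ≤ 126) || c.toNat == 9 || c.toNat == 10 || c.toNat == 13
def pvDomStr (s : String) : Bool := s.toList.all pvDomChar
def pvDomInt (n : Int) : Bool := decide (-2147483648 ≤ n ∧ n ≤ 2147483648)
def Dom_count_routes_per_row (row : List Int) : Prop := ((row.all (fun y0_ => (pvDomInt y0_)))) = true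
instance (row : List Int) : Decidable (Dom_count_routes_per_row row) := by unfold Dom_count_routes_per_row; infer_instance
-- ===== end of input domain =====

-- B replaces A's in_route state machine with a direct count of nonzero→zero adjacent pairs (simpler decomposition, same cost).


-- ===== PORT A =====
-- A's loop over `row` carrying (routes, in_route), branch order as in the Python.
def countRoutesLoop : List Int → Int → Bool → Int
  | [], routes, _ => routes
  | v :: rest, routes, in_route =>
    if v ≠ 0 ∧ in_route = false then
      countRoutesLoop rest routes true
    else if v = 0 ∧ in_route = true then
      countRoutesLoop rest (routes + 1) false
    else
      countRoutesLoop rest routes in_route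

def count_routes_per_row (row : List Int) : Int :=
  countRoutesLoop row 0 false

-- ===== PORT B =====
-- pairwise(row) = row.zip row.tail; sum(1 for … if cond) = countP cond.
def count_routes_per_row_alt (row : List Int) : Int :=
  ((row.zip row.tail).countP (fun p => decide (p.1 ≠ 0 ∧ p.2 = 0)) : Int)

-- ===== PRECONDITION & SPEC =====
def Spec_count_routes_per_row (row : List Int) (out : Int) : Prop := out = count_routes_per_row_alt row
instance (row : List Int) (out : Int) : Decidable (Spec_count_routes_per_row row out) := by unfold Spec_count_routes_per_row; infer_instance

-- ===== CLAIM (what is proved, stated in full; the proofs are below) =====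
def Claim_equal_count_routes_per_row : Prop := ∀ (row : List Int), Dom_count_routes_per_row row → Spec_count_routes_per_row row (count_routes_per_row row)

-- ===== LEMMAS AND PROOFS =====

-- A's loop with state (r, b) equals r plus the pair-count of the row prefixed by a
-- sentinel `prev` whose nonzeroness encodes the flag b.
theorem countRoutesLoop_eq_countP (row : List Int) :
    ∀ (prev : Int) (r : Int),
      countRoutesLoop row r (decide (prev ≠ 0)) =
        r + (((prev :: row).zip row).countP (fun p => decide (p.1 ≠ 0 ∧ p.2 = 0)) : Int) := by
  induction row with
  | nil => intro prev r; simp [countRoutesLoop]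
  | cons v rest ih =>
    intro prev r
    simp only [countRoutesLoop, List.zip, List.zipWith, List.countP_cons]
    by_cases hp : prev ≠ 0 <;> by_cases hv : v = 0 <;>
      simp only [hp, hv, decide_true, decide_false, ne_eq, not_true_eq_false,
        not_false_eq_true, true_and, false_and, and_true, and_false, if_true, if_false,
        Bool.false_eq_true]
    · have h := ih 0 (r + 1)
      simp only [show (decide ((0:Int) ≠ 0) : Bool) = false from rfl, List.zip] at h
      rw [h]; push_cast; ring
    · have h := ih v r
      simp only [show (decide (v ≠ 0) : Bool) = true from by simp [hv], List.zip] at h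
      rw [h]; push_cast; ring
    · have h := ih 0 r
      simp only [show (decide ((0:Int) ≠ 0) : Bool) = false from rfl, List.zip] at h
      rw [h]; push_cast; ring
    · have h := ih v r
      simp only [show (decide (v ≠ 0) : Bool) = true from by simp [hv], List.zip] at h
      rw [h]; push_cast; ring

-- ===== VERDICT (by name: the statement is the Claim_ definition above) =====
theorem count_routes_per_row_spec : Claim_equal_count_routes_per_row := by
  intro row _
  unfold Spec_count_routes_per_row count_routes_per_row count_routes_per_row_alt
  have h := countRoutesLoop_eq_countP row 0 0
  simp only [show (decide ((0:Int) ≠ 0) : Bool) = false from rfl] at h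
  rw [h]
  cases row with
  | nil => simp
  | cons v rest =>
    simp [List.zip, List.zipWith]
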